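-- pv_equiv track=rewrite | github.com/yfzzzyyls/Design_and_Verification_Projects | prepare_calibre_lvs_source.py | rewrite_spi_subckt_headers
-- ===== SOURCE A (Python) =====
-- from typing import Dict, List, Optional, Set, Tuple
--
-- def rewrite_spi_subckt_headers(
--     text: str,
--     desired_pins: Dict[str, List[str]],
--     drop_pins: Set[str],
-- ) -> str:
--     out: List[str] = []
--     lines = text.splitlines()
--     i = 0
--     while i < len(lines):
--         line = lines[i]
--         stripped = line.strip()
--         if not stripped.lower().startswith(".subckt "):
--             out.append(line.rstrip())
--             i += 1
--             continue
--
--         header = stripped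
--         i += 1
--         while i < len(lines) and lines[i].lstrip().startswith("+"):
--             header += " " + lines[i].lstrip()[1:].strip()
--             i += 1
--
--         tokens = header.split()
--         name = tokens[1]
--         orig_pins = [tok for tok in tokens[2:] if tok not in drop_pins]
--         new_pins = desired_pins.get(name, orig_pins)
--         out.append(f".subckt {name} {' '.join(new_pins)}".rstrip())
--         continue
--     return "\n".join(out) + "\n"
-- ===== SOURCE B (Python) =====
-- from typing import Dict, List, Optional, Set, Tuple
--
-- def rewrite_spi_subckt_headers(
--     text: str,
--     desired_pins: Dict[str, List[str]],
--     drop_pins: Set[str],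
-- ) -> str:
--     out: List[str] = []
--     pending: Optional[str] = None  # header tokens buffered so far
--
--     def flush(header: str) -> None:
--         tokens = header.split()
--         name = tokens[1]
--         orig_pins = [tok for tok in tokens[2:] if tok not in drop_pins]
--         new_pins = desired_pins.get(name, orig_pins)
--         out.append(f".subckt {name} {' '.join(new_pins)}".rstrip())
--
--     for line in text.splitlines():
--         if pending is not None and line.lstrip().startswith("+"):
--             pending += " " + line.lstrip()[1:].strip()
--         elif line.strip().lower().startswith(".subckt "):
--             if pending is not None:
--                 flush(pending)
--             pending = line.strip()
--         else:
--             if pending is not None: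
--                 flush(pending)
--                 pending = None
--             out.append(line.rstrip())
--     if pending is not None:
--         flush(pending)
--     return "\n".join(out) + "\n"
-- ===== Notes on version B (the rewrite author's own statement) =====
-- stated objective: simpler
-- what changed: Replaced A's shared-index while-loop with a nested inner while over continuation lines by a single flat for-loop over the lines with an explicit pending-header buffer (a small state machine), flushed on the next non-continuation line and once after the loop.
import Mathlib
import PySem

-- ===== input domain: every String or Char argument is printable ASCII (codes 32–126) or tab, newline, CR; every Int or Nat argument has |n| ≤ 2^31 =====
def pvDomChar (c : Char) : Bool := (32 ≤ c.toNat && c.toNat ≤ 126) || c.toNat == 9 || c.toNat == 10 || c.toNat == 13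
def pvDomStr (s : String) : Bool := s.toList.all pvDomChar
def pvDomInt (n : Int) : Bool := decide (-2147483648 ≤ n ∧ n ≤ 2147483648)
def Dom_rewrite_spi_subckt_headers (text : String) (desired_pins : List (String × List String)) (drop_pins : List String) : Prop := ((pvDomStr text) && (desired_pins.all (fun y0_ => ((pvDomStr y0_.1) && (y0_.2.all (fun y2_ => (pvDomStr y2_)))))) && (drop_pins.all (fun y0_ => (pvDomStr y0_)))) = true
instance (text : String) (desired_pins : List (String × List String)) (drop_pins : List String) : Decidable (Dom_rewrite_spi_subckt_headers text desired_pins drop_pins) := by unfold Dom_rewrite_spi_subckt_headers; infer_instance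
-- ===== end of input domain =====

-- B replaces A's shared-index while loop (with a nested inner while gathering '+' continuation
-- lines) by ONE flat for-loop over the lines carrying a pending-header buffer that is flushed on
-- the next non-continuation line and once after the loop; objective: simpler.

-- ===== PORT A =====
-- shared by both ports (both Pythons build the flushed header line with exactly this code):
-- tokens[1] is always in range here (the header starts with ".subckt " and, being stripped,
-- has a non-space character after it), so the .getD default "" is unreachable.
def pvFlush (desired_pins : List (String × List String)) (drop_pins : List String) (header : String) : String :=
  let tokens := PySem.Str.split₀ header
  let name := tokens.getD 1 ""
  let orig_pins := (tokens.drop 2).filter (fun tok => !(PySem.Set.contains drop_pins tok))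
  let new_pins := ((PySem.Dict.mk desired_pins).get? name).getD orig_pins
  PySem.Str.rstrip (".subckt " ++ name ++ " " ++ PySem.Str.join " " new_pins)

-- A's inner 'while i < len(lines) and lines[i].lstrip().startswith("+")' loop
def pvGather (lines : List String) (header : String) : String × List String :=
  match lines with
  | [] => (header, [])
  | l :: ls =>
    if PySem.Str.startswith (PySem.Str.lstrip l) "+" then
      pvGather ls (header ++ " " ++ PySem.Str.strip (PySem.Str.slice (PySem.Str.lstrip l) (some 1) none))
    else (header, l :: ls)

theorem pvGather_len (lines : List String) (header : String) :
    (pvGather lines header).2.length ≤ lines.length := by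
  induction lines generalizing header with
  | nil => simp [pvGather]
  | cons l ls ih =>
    simp only [pvGather]
    split
    · exact Nat.le_succ_of_le (ih _)
    · simp

-- A's outer while loop over the shared index i
def pvProcessA (desired_pins : List (String × List String)) (drop_pins : List String) :
    List String → List String
  | [] => []
  | l :: ls =>
    let stripped := PySem.Str.strip l
    if PySem.Str.startswith (PySem.Str.lower stripped) ".subckt " = false then
      PySem.Str.rstrip l :: pvProcessA desired_pins drop_pins ls
    else
      let g := pvGather ls stripped
      pvFlush desired_pins drop_pins g.1 :: pvProcessA desired_pins drop_pins g.2
termination_by ls => ls.length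
decreasing_by
  · simp
  · exact Nat.lt_succ_of_le (pvGather_len ls (PySem.Str.strip l))

def rewrite_spi_subckt_headers (text : String) (desired_pins : List (String × List String)) (drop_pins : List String) : String :=
  PySem.Str.join "\n" (pvProcessA desired_pins drop_pins (PySem.Str.splitlines text)) ++ "\n"

-- ===== PORT B =====
-- B's loop body: state = (out so far, pending header buffer)
def pvStepB (desired_pins : List (String × List String)) (drop_pins : List String)
    (st : List String × Option String) (line : String) : List String × Option String :=
  match st with
  | (out, some h) =>
    if PySem.Str.startswith (PySem.Str.lstrip line) "+" then
      (out, some (h ++ " " ++ PySem.Str.strip (PySem.Str.slice (PySem.Str.lstrip line) (some 1) none)))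
    else if PySem.Str.startswith (PySem.Str.lower (PySem.Str.strip line)) ".subckt " then
      (out ++ [pvFlush desired_pins drop_pins h], some (PySem.Str.strip line))
    else
      (out ++ [pvFlush desired_pins drop_pins h, PySem.Str.rstrip line], none)
  | (out, none) =>
    if PySem.Str.startswith (PySem.Str.lower (PySem.Str.strip line)) ".subckt " then
      (out, some (PySem.Str.strip line))
    else
      (out ++ [PySem.Str.rstrip line], none)

-- the trailing 'if pending is not None: flush(pending)'
def pvFin (desired_pins : List (String × List String)) (drop_pins : List String) :
    Option String → List String
  | some h => [pvFlush desired_pins drop_pins h]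
  | none => []

def rewrite_spi_subckt_headers_alt (text : String) (desired_pins : List (String × List String)) (drop_pins : List String) : String :=
  PySem.Str.join "\n"
    (((PySem.Str.splitlines text).foldl (pvStepB desired_pins drop_pins) ([], none)).1
      ++ pvFin desired_pins drop_pins
          (((PySem.Str.splitlines text).foldl (pvStepB desired_pins drop_pins) ([], none)).2))
  ++ "\n"

-- ===== PRECONDITION & SPEC =====
def Spec_rewrite_spi_subckt_headers (text : String) (desired_pins : List (String × List String)) (drop_pins : List String) (out : String) : Prop := out = rewrite_spi_subckt_headers_alt text desired_pins drop_pins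
instance (text : String) (desired_pins : List (String × List String)) (drop_pins : List String) (out : String) : Decidable (Spec_rewrite_spi_subckt_headers text desired_pins drop_pins out) := by unfold Spec_rewrite_spi_subckt_headers; infer_instance

-- ===== CLAIM (what is proved, stated in full; the proofs are below) =====
def Claim_equal_rewrite_spi_subckt_headers : Prop := ∀ (text : String) (desired_pins : List (String × List String)) (drop_pins : List String), Dom_rewrite_spi_subckt_headers text desired_pins drop_pins → Spec_rewrite_spi_subckt_headers text desired_pins drop_pins (rewrite_spi_subckt_headers text desired_pins drop_pins)

-- ===== LEMMAS AND PROOFS =====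

-- The state-machine fold, finalised, emits exactly what A's index loop emits: proved for the two
-- states at once (no pending header / pending header h, where A is inside pvGather).
theorem pvMain (desired_pins : List (String × List String)) (drop_pins : List String)
    (lines : List String) :
    (∀ acc : List String,
      (lines.foldl (pvStepB desired_pins drop_pins) (acc, none)).1
        ++ pvFin desired_pins drop_pins (lines.foldl (pvStepB desired_pins drop_pins) (acc, none)).2
      = acc ++ pvProcessA desired_pins drop_pins lines)
    ∧ (∀ (acc : List String) (h : String),
      (lines.foldl (pvStepB desired_pins drop_pins) (acc, some h)).1
        ++ pvFin desired_pins drop_pins (lines.foldl (pvStepB desired_pins drop_pins) (acc, some h)).2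
      = acc ++ pvFlush desired_pins drop_pins (pvGather lines h).1
          :: pvProcessA desired_pins drop_pins (pvGather lines h).2) := by
  induction lines with
  | nil =>
    constructor
    · intro acc; simp [pvFin, pvProcessA]
    · intro acc h; simp [pvFin, pvGather, pvProcessA]
  | cons l ls ih =>
    constructor
    · intro acc
      rw [List.foldl_cons]
      by_cases hs : PySem.Chars.startswith (PySem.Chars.lower (PySem.Chars.strip l.toList))
          ['.', 's', 'u', 'b', 'c', 'k', 't', ' '] = true
      · have hstep : pvStepB desired_pins drop_pins (acc, none) l
            = (acc, some (PySem.Str.strip l)) := by simp [pvStepB, hs]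
        rw [hstep, ih.2]
        conv_rhs => rw [pvProcessA]
        simp [hs]
      · have hstep : pvStepB desired_pins drop_pins (acc, none) l
            = (acc ++ [PySem.Str.rstrip l], none) := by simp [pvStepB, hs]
        rw [hstep, ih.1]
        conv_rhs => rw [pvProcessA]
        simp [hs]
    · intro acc h
      rw [List.foldl_cons]
      by_cases hp : PySem.Chars.startswith (PySem.Chars.lstrip l.toList) ['+'] = true
      · have hstep : pvStepB desired_pins drop_pins (acc, some h) l
            = (acc, some (h ++ " " ++ PySem.Str.strip (PySem.Str.slice (PySem.Str.lstrip l) (some 1) none))) := by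
          simp [pvStepB, hp]
        have hg : pvGather (l :: ls) h
            = pvGather ls (h ++ " " ++ PySem.Str.strip (PySem.Str.slice (PySem.Str.lstrip l) (some 1) none)) := by
          simp [pvGather, hp]
        rw [hstep, ih.2, hg]
      · have hg : pvGather (l :: ls) h = (h, l :: ls) := by simp [pvGather, hp]
        rw [hg]
        by_cases hs : PySem.Chars.startswith (PySem.Chars.lower (PySem.Chars.strip l.toList))
            ['.', 's', 'u', 'b', 'c', 'k', 't', ' '] = true
        · have hstep : pvStepB desired_pins drop_pins (acc, some h) l
              = (acc ++ [pvFlush desired_pins drop_pins h], some (PySem.Str.strip l)) := by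
            simp [pvStepB, hp, hs]
          rw [hstep, ih.2]
          conv_rhs => rw [pvProcessA]
          simp [hs]
        · have hstep : pvStepB desired_pins drop_pins (acc, some h) l
              = (acc ++ [pvFlush desired_pins drop_pins h, PySem.Str.rstrip l], none) := by
            simp [pvStepB, hp, hs]
          rw [hstep, ih.1]
          conv_rhs => rw [pvProcessA]
          simp [hs]

-- ===== VERDICT (by name: the statement is the Claim_ definition above) =====
theorem rewrite_spi_subckt_headers_spec : Claim_equal_rewrite_spi_subckt_headers := by
  intro text desired_pins drop_pins _
  unfold Spec_rewrite_spi_subckt_headers rewrite_spi_subckt_headers rewrite_spi_subckt_headers_alt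
  rw [(pvMain desired_pins drop_pins (PySem.Str.splitlines text)).1 []]
  simp
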